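-- pv_equiv track=rewrite | github.com/hirosuzuki/procon | googlecodejam2019/qual_a.py | solve
-- ===== SOURCE A (Python) =====
-- def solve(n):
--     a, b = 0, 0
--     k = 0
--     while n:
--         n, m = divmod(n, 10)
--         if m == 4:
--             x, y = 2, 2
--         else:
--             x, y = m, 0
--         a += 10**k * x
--         b += 10**k * y
--         k += 1
--     return a, b
-- ===== SOURCE B (Python) =====
-- def solve(n):
--     def fours(m):
--         return 0 if m == 0 else 10 * fours(m // 10) + (2 if m % 10 == 4 else 0)
--     b = fours(n)
--     return n - b, b
-- ===== Notes on version B (the rewrite author's own statement) =====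
-- stated objective: simpler
-- what changed: B exploits the invariant a+b=n: a single recursive function computes only the 'fours' component b (digit 2 wherever n has digit 4), and a is obtained as n-b, replacing A's while loop with two power-weighted accumulators and a position counter.
import Mathlib
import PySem

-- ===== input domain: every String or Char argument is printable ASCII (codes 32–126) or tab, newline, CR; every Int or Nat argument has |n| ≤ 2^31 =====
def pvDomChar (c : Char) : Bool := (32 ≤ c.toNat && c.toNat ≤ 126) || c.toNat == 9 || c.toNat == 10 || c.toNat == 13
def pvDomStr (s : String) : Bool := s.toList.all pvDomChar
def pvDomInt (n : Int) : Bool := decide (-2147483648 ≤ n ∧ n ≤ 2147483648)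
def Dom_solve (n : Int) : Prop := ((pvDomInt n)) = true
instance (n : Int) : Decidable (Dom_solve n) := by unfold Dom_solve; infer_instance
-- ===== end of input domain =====

-- B computes only the "fours" component b recursively and returns (n - b, b), using the invariant a + b = n; simpler than A's two power-weighted accumulators.


-- ===== PORT A =====
-- A's while loop, run on n.toNat (exact for 0 ≤ n, which Pre_solve requires;
-- Python's loop never terminates for n < 0). divmod(m,10) for m ≥ 0 is Nat m/10, m%10.
def solveLoopA (m k : Nat) (a b : Int) : Int × Int :=
  if _h : m = 0 then (a, b)
  else
    let q := m / 10
    let r : Int := (m % 10 : Nat)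
    let xy := if r = 4 then ((2 : Int), (2 : Int)) else (r, (0 : Int))
    solveLoopA q (k + 1) (a + 10 ^ k * xy.1) (b + 10 ^ k * xy.2)
  termination_by m
  decreasing_by exact Nat.div_lt_self (Nat.pos_of_ne_zero _h) (by omega)

def solve (n : Int) : Int × Int := solveLoopA n.toNat 0 0 0

-- ===== PORT B =====
-- B's recursive 'fours', run on m.toNat (exact for 0 ≤ n; Python's recursion on m//10
-- never terminates for m < 0).
def foursNat (m : Nat) : Int :=
  if _h : m = 0 then 0
  else 10 * foursNat (m / 10) + (if m % 10 = 4 then 2 else 0)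
  termination_by m
  decreasing_by exact Nat.div_lt_self (Nat.pos_of_ne_zero _h) (by omega)

def solve_alt (n : Int) : Int × Int :=
  let b := foursNat n.toNat
  (n - b, b)

-- ===== PRECONDITION & SPEC =====
-- Pre_ excludes n < 0: there Python's A (and B) loop/recurse forever.
def Pre_solve (n : Int) : Prop := 0 ≤ n
instance (n : Int) : Decidable (Pre_solve n) := by unfold Pre_solve; infer_instance
def pvWitness_solve : Int := 45

def Spec_solve (n : Int) (out : Int × Int) : Prop := out = solve_alt n
instance (n : Int) (out : Int × Int) : Decidable (Spec_solve n out) := by unfold Spec_solve; infer_instance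

-- ===== CLAIM (what is proved, stated in full; the proofs are below) =====
def Claim_equal_solve : Prop := ∀ (n : Int), Dom_solve n → Pre_solve n → Spec_solve n (solve n)

-- ===== LEMMAS AND PROOFS =====

-- A's loop invariant: the two accumulators are a + 10^k·(m − fours m) and b + 10^k·fours m.
theorem solveLoopA_eq (m : Nat) : ∀ (k : Nat) (a b : Int),
    solveLoopA m k a b = (a + 10 ^ k * ((m : Int) - foursNat m), b + 10 ^ k * foursNat m) := by
  induction m using Nat.strong_induction_on with
  | _ m ih =>
    intro k a b
    by_cases h : m = 0
    · subst h
      rw [solveLoopA, foursNat]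
      simp
    · rw [solveLoopA, foursNat]
      simp only [h, dite_false]
      rw [ih (m / 10) (Nat.div_lt_self (Nat.pos_of_ne_zero h) (by omega))]
      have hm : (m : Int) = 10 * ((m / 10 : Nat) : Int) + ((m % 10 : Nat) : Int) := by
        push_cast [Nat.div_add_mod]
        omega
      by_cases hr : ((m % 10 : Nat) : Int) = 4
      · have hr' : m % 10 = 4 := by exact_mod_cast hr
        rw [if_pos hr, if_pos hr', Prod.mk.injEq]
        exact ⟨by rw [hm, hr]; ring, by ring⟩
      · have hr' : ¬ m % 10 = 4 := fun hc => hr (by exact_mod_cast hc)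
        rw [if_neg hr, if_neg hr', Prod.mk.injEq]
        exact ⟨by rw [hm]; ring, by ring⟩

-- ===== VERDICT (by name: the statement is the Claim_ definition above) =====
theorem solve_spec : Claim_equal_solve := by
  intro n _ hpre
  show solve n = solve_alt n
  rw [solve, solve_alt, solveLoopA_eq]
  have : ((n.toNat : Int)) = n := Int.toNat_of_nonneg hpre
  simp [this]
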